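-- pv_equiv track=rewrite | github.com/yubocai-poly/-Design-and-Analysis-of-Algorithms | midterm2021/test_witness.py | compute_witness_complete
-- ===== SOURCE A (Python) =====
-- def compute_witness_complete(A,B):
--     n = len(A)
--     W = [[[] for i in range(n)] for j in range(n)]
--     for i in range(n):
--         for j in range(n):
--             for k in range(n):
--                 if (A[i][k] == 1 and B[k][j] == 1):
--                     W[i][j].append(k+1)
--     return W
-- ===== SOURCE B (Python) =====
-- def compute_witness_complete(A, B):
--     n = len(A)
--     Arow = [[k for k in range(n) if A[i][k] == 1] for i in range(n)]
--     Bcol = [{k for k in range(n) if B[k][j] == 1} for j in range(n)]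
--     return [[[k + 1 for k in Arow[i] if k in Bcol[j]] for j in range(n)] for i in range(n)]
-- ===== Notes on version B (the rewrite author's own statement) =====
-- stated objective: faster
-- what changed: Precompute per-row one-position lists of A and per-column one-position sets of B once; each W[i][j] is then built by iterating only over A's row-i one-positions with O(1) set membership against B's column-j set, instead of re-scanning all n indices with two matrix lookups per (i,j,k).
-- outside the precondition, e.g. on compute_witness_complete([[0]], [[]]): A returns [[[]]], B raises IndexError
import Mathlib
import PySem

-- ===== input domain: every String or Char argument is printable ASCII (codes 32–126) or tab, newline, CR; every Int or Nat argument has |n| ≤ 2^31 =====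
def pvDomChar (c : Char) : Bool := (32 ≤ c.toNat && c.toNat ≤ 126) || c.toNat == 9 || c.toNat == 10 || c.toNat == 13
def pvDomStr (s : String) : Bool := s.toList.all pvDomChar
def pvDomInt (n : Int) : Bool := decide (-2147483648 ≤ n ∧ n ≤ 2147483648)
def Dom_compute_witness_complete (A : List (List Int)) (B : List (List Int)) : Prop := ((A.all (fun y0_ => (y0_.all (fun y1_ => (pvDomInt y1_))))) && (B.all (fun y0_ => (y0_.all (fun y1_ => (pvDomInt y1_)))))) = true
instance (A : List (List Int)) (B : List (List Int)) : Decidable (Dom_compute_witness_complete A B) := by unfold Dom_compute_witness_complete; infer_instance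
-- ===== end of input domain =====

-- B precomputes A's per-row one-position lists and B's per-column one-position sets once, so each
-- W[i][j] iterates only over row i's one-positions with a set-membership test, instead of scanning
-- all k with two matrix lookups per (i,j,k).

-- ===== PORT A =====
-- W[i][j].append(v): exact for the in-range nonnegative i, j the loops produce
def pvUpd (W : List (List (List Int))) (i j : Int) (v : Int) : List (List (List Int)) :=
  PySem.List.pySetD W i
    (PySem.List.pySetD (PySem.List.pyGetD W i []) j
      ((PySem.List.pyGetD (PySem.List.pyGetD W i []) j []) ++ [v]))

def compute_witness_complete (A : List (List Int)) (B : List (List Int)) : List (List (List Int)) :=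
  let n : Int := PySem.List.len A
  let W : List (List (List Int)) :=
    (PySem.List.pyRange 0 n).map (fun _ => (PySem.List.pyRange 0 n).map (fun _ => ([] : List Int)))
  (PySem.List.pyRange 0 n).foldl (fun W i =>
    (PySem.List.pyRange 0 n).foldl (fun W j =>
      (PySem.List.pyRange 0 n).foldl (fun W k =>
        if PySem.List.pyGetD (PySem.List.pyGetD A i []) k 0 == 1 &&
           PySem.List.pyGetD (PySem.List.pyGetD B k []) j 0 == 1
        then pvUpd W i j (k + 1) else W) W) W) W

-- ===== PORT B =====
def compute_witness_complete_alt (A : List (List Int)) (B : List (List Int)) : List (List (List Int)) :=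
  let n : Int := PySem.List.len A
  let Arow : List (List Int) :=
    (PySem.List.pyRange 0 n).map (fun i =>
      (PySem.List.pyRange 0 n).filter (fun k =>
        PySem.List.pyGetD (PySem.List.pyGetD A i []) k 0 == 1))
  let Bcol : List (PySem.Set Int) :=
    (PySem.List.pyRange 0 n).map (fun j =>
      PySem.Set.ofList ((PySem.List.pyRange 0 n).filter (fun k =>
        PySem.List.pyGetD (PySem.List.pyGetD B k []) j 0 == 1)))
  (PySem.List.pyRange 0 n).map (fun i =>
    (PySem.List.pyRange 0 n).map (fun j =>
      (((PySem.List.pyGetD Arow i []).filter (fun k =>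
          decide (k ∈ PySem.List.pyGetD Bcol j (PySem.Set.ofList [])))).map (fun k => k + 1))))

-- ===== PRECONDITION & SPEC =====
-- Pre_ excludes ragged inputs on which indexing can raise; it also excludes the inputs where A
-- avoids an IndexError in B's rows only because 'A[i][k] == 1 and ...' short-circuits — there A
-- returns while B's unconditional column precomputation raises the same IndexError.
def Pre_compute_witness_complete (A : List (List Int)) (B : List (List Int)) : Prop :=
  (∀ row ∈ A, A.length ≤ row.length) ∧ A.length ≤ B.length ∧
    ∀ row ∈ B.take A.length, A.length ≤ row.length
instance (A : List (List Int)) (B : List (List Int)) : Decidable (Pre_compute_witness_complete A B) := by unfold Pre_compute_witness_complete; infer_instance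

def pvWitness_compute_witness_complete : List (List Int) × List (List Int) :=
  ([[1, 0], [1, 1]], [[0, 1], [1, 1]])

def Spec_compute_witness_complete (A : List (List Int)) (B : List (List Int)) (out : List (List (List Int))) : Prop := out = compute_witness_complete_alt A B
instance (A : List (List Int)) (B : List (List Int)) (out : List (List (List Int))) : Decidable (Spec_compute_witness_complete A B out) := by unfold Spec_compute_witness_complete; infer_instance

-- ===== CLAIM (what is proved, stated in full; the proofs are below) =====
def Claim_equal_compute_witness_complete : Prop := ∀ (A : List (List Int)) (B : List (List Int)), Dom_compute_witness_complete A B → Pre_compute_witness_complete A B → Spec_compute_witness_complete A B (compute_witness_complete A B)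

-- ===== LEMMAS AND PROOFS =====

-- the inner condition and the per-cell witness list both ports produce
def pvCond (A B : List (List Int)) (i j k : Int) : Bool :=
  PySem.List.pyGetD (PySem.List.pyGetD A i []) k 0 == 1 &&
  PySem.List.pyGetD (PySem.List.pyGetD B k []) j 0 == 1

def pvL (A B : List (List Int)) (i j : Int) : List Int :=
  ((PySem.List.pyRange 0 (A.length : Int)).filter (pvCond A B i j)).map (fun k => k + 1)

def pvTarget (A B : List (List Int)) : List (List (List Int)) :=
  (PySem.List.pyRange 0 (A.length : Int)).map (fun i =>
    (PySem.List.pyRange 0 (A.length : Int)).map (fun j => pvL A B i j))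

-- a fold of steps that each rewrite position m from its old value collapses to one set
theorem pv_foldl_set_point {α β : Type} (d : α) (m : Nat) (p : β → Bool) (f : β → α → α) :
    ∀ (ks : List β) (W : List α),
      ks.foldl (fun W k => if p k then W.set m (f k (W.getD m d)) else W) W
        = W.set m ((ks.filter p).foldl (fun x k => f k x) (W.getD m d)) := by
  intro ks
  induction ks with
  | nil =>
    intro W
    rw [List.foldl_nil, List.filter_nil, List.foldl_nil]
    by_cases hm : m < W.length
    · rw [List.getD_eq_getElem _ _ hm, List.set_getElem_self]
    · rw [List.set_eq_of_length_le (by omega)]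
  | cons k ks ih =>
    intro W
    by_cases hp : p k
    · rw [List.foldl_cons, if_pos hp, List.filter_cons_of_pos hp, List.foldl_cons, ih]
      by_cases hm : m < W.length
      · rw [List.set_set, List.getD_eq_getElem _ _ (by simpa using hm),
            List.getElem_set_self, List.getD_eq_getElem _ _ hm]
      · have hno : ∀ (v : α), W.set m v = W := fun v => List.set_eq_of_length_le (by omega)
        simp only [hno]
    · rw [List.foldl_cons, if_neg (by simpa using hp),
          List.filter_cons_of_neg (by simpa using hp), ih]

-- a fold of set-from-old-value steps at indices 0,…,len−1 is mapIdx
theorem pv_foldl_set_range {α : Type} (d : α) :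
    ∀ (W : List α) (g : Nat → α → α),
      (List.range W.length).foldl (fun W j => W.set j (g j (W.getD j d))) W
        = W.mapIdx (fun j x => g j x) := by
  intro W
  induction W with
  | nil => intro g; rw [List.length_nil, List.range_zero, List.foldl_nil, List.mapIdx_nil]
  | cons x xs ih =>
    intro g
    have hshift : ∀ (l : List Nat) (y : α) (ys : List α),
        l.foldl (fun W j => W.set (j + 1) (g (j + 1) (W.getD (j + 1) d))) (y :: ys)
          = y :: l.foldl (fun W j => W.set j (g (j + 1) (W.getD j d))) ys := by
      intro l
      induction l with
      | nil => intro y ys; rw [List.foldl_nil, List.foldl_nil]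
      | cons j l ihl =>
        intro y ys
        rw [List.foldl_cons, List.foldl_cons, List.set_cons_succ, List.getD_cons_succ, ihl]
    rw [List.length_cons, List.range_succ_eq_map, List.foldl_cons, List.set_cons_zero,
        List.getD_cons_zero, List.foldl_map, List.mapIdx_cons, hshift]
    exact congrArg _ (ih (fun i => g (i + 1)))

theorem pv_alt_eq (A B : List (List Int)) :
    compute_witness_complete_alt A B = pvTarget A B := by
  unfold compute_witness_complete_alt pvTarget pvL
  simp only [PySem.List.len_eq]
  apply List.map_congr_left
  intro i hi
  rw [PySem.List.mem_pyRange_one] at hi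
  apply List.map_congr_left
  intro j hj
  rw [PySem.List.mem_pyRange_one] at hj
  rw [PySem.List.pyGetD_map_pyRange_of_nonneg _ _ _ _ hi.1 hi.2]
  simp only [PySem.List.pyGetD_map_pyRange_of_nonneg _ _ _ _ hj.1 hj.2]
  rw [List.filter_filter]
  apply congrArg (List.map _)
  apply List.filter_congr
  intro k hk
  rw [PySem.List.mem_pyRange_one] at hk
  simp [PySem.Set.mem_ofList, List.mem_filter, PySem.List.mem_pyRange_one, hk, pvCond,
    Bool.and_comm, Bool.beq_eq_decide_eq]

-- proof-side names for A's loop bodies after index normalisation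
def pvLn (A B : List (List Int)) (m mj : Nat) : List Int :=
  ((List.range A.length).filter (fun mk =>
    (A.getD m []).getD mk 0 == 1 && (B.getD mk []).getD mj 0 == 1)).map
      (fun mk : Nat => (mk : Int) + 1)

def pvRow (A B : List (List Int)) (m : Nat) (row : List (List Int)) : List (List Int) :=
  (List.range A.length).foldl (fun row mj => row.set mj (row.getD mj [] ++ pvLn A B m mj)) row

-- pv_foldl_set_point without the guard
theorem pv_foldl_set_point' {α β : Type} (d : α) (m : Nat) (f : β → α → α)
    (ks : List β) (W : List α) :
    ks.foldl (fun W k => W.set m (f k (W.getD m d))) W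
      = W.set m (ks.foldl (fun x k => f k x) (W.getD m d)) := by
  have h := pv_foldl_set_point d m (fun _ => true) f ks W
  simpa using h

-- the innermost k-loop of A collapses to one append at cell (m, mj)
theorem pv_inner_eq (p : Nat → Bool) (v : Nat → Int) (m mj : Nat)
    (ks : List Nat) (W : List (List (List Int))) :
    ks.foldl (fun W mk =>
        if p mk then
          W.set m ((W.getD m []).set mj ((W.getD m []).getD mj [] ++ [v mk]))
        else W) W
      = W.set m ((W.getD m []).set mj ((W.getD m []).getD mj [] ++ (ks.filter p).map v)) := by
  refine (pv_foldl_set_point [] m p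
    (fun mk row => row.set mj (row.getD mj [] ++ [v mk])) ks W).trans ?_
  refine congrArg _ ?_
  refine (pv_foldl_set_point' [] mj (fun mk c => c ++ [v mk]) _ (W.getD m [])).trans ?_
  rw [PySem.List.foldl_append_singleton_eq_map]

-- a fold of set-from-old-value steps over a constant list is a map over the indices
theorem pv_outer {α β : Type} (d : α) (g : Nat → α → α) (c : α) (l : List β) :
    (List.range l.length).foldl (fun W m => W.set m (g m (W.getD m d))) (l.map (fun _ => c))
      = (List.range l.length).map (fun m => g m c) := by
  have h1 : List.range l.length = List.range (l.map (fun _ => c)).length := by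
    rw [List.length_map]
  rw [h1, pv_foldl_set_range]
  apply List.ext_getElem
  · simp
  · intro i h₁ h₂
    simp [List.getElem_mapIdx]

-- pv_outer with the index list's length given as an equation
theorem pv_outer' {α β : Type} (d : α) (g : Nat → α → α) (c : α) (l : List β) (n : Nat)
    (hl : l.length = n) :
    (List.range n).foldl (fun W m => W.set m (g m (W.getD m d))) (l.map (fun _ => c))
      = (List.range n).map (fun m => g m c) := by
  subst hl; exact pv_outer d g c l

theorem pv_a_eq (A B : List (List Int)) :
    compute_witness_complete A B = pvTarget A B := by
  unfold compute_witness_complete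
  simp only [PySem.List.len_eq]
  rw [PySem.List.pyRange_zero_nat]
  simp only [List.foldl_map, pvUpd, PySem.List.pySetD_natCast, PySem.List.pyGetD_natCast]
  trans ((List.range A.length).foldl (fun W m => W.set m (pvRow A B m (W.getD m [])))
      ((List.map (fun k : Nat => (k : Int)) (List.range A.length)).map
        (fun _ => (List.map (fun k : Nat => (k : Int)) (List.range A.length)).map
          (fun _ => ([] : List Int)))))
  · apply PySem.List.foldl_congr_mem
    intro W m _
    refine (PySem.List.foldl_congr_mem _ _
        (fun W' mj => W'.set m ((W'.getD m []).set mj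
          ((W'.getD m []).getD mj [] ++ pvLn A B m mj))) _ ?_).trans ?_
    · intro W' mj _
      refine (pv_inner_eq _ _ m mj (List.range A.length) W').trans ?_
      simp only [pvLn]
    · exact pv_foldl_set_point' [] m
        (fun mj row => row.set mj (row.getD mj [] ++ pvLn A B m mj)) (List.range A.length) W
  · rw [pv_outer' ([] : List (List Int)) (fun m row => pvRow A B m row) _ _ A.length
        (by rw [List.length_map, List.length_range])]
    unfold pvTarget
    rw [PySem.List.pyRange_zero_nat]
    simp only [List.map_map, Function.comp_def]
    apply List.map_congr_left
    intro m hm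
    unfold pvRow
    rw [pv_outer' ([] : List Int) (fun mj cell => cell ++ pvLn A B m mj) ([] : List Int)
        (List.range A.length) A.length (by rw [List.length_range])]
    apply List.map_congr_left
    intro mj hmj
    simp [pvLn, pvL, pvCond, PySem.List.pyRange_zero_nat, List.filter_map, List.map_map,
      Function.comp_def, PySem.List.pyGetD_natCast]

-- ===== VERDICT (by name: the statement is the Claim_ definition above) =====
theorem compute_witness_complete_spec : Claim_equal_compute_witness_complete := by
  intro A B _ _
  unfold Spec_compute_witness_complete
  rw [pv_a_eq, pv_alt_eq]
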